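-- pv_equiv track=rewrite | github.com/okdesign21/ortflix-costume | tautulli/tautulli_utils.py | _clean_username
-- ===== SOURCE A (Python) =====
-- from typing import Optional
--
-- def _clean_username(name: Optional[str]) -> Optional[str]:
--     """Slugify username for tag labels: ASCII alphanumeric + hyphens only (Radarr/Sonarr requirement).
--     Returns None if username contains non-ASCII characters or no alphanumeric characters.
--     """
--     if not name:
--         return None
--     # Only keep ASCII letters, digits, and replace others with hyphens
--     cleaned = "".join(
--         ch.lower() if (ch.isascii() and ch.isalnum()) else "-" for ch in str(name)
--     )
--     cleaned = cleaned.strip("-")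
--     while "--" in cleaned:
--         cleaned = cleaned.replace("--", "-")
--     # If no valid ASCII alphanumeric chars remain, return None for fallback
--     if not cleaned or not any(ch.isascii() and ch.isalnum() for ch in cleaned):
--         return None
--     return cleaned
-- ===== SOURCE B (Python) =====
-- import re
-- from typing import Optional
--
-- def _clean_username(name: Optional[str]) -> Optional[str]:
--     """Slugify username: extract ASCII-alphanumeric runs, join with hyphens, lowercase."""
--     if not name:
--         return None
--     parts = re.findall(r"[A-Za-z0-9]+", str(name))
--     if not parts:
--         return None
--     return "-".join(parts).lower()
-- ===== Notes on version B (the rewrite author's own statement) =====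
-- stated objective: simpler
-- what changed: Replaces A's per-character substitution to hyphen placeholders, edge strip and repeated double-hyphen collapse loop by a single regex tokenization of the maximal ASCII-alphanumeric runs, joined with hyphens and lowercased once at the end.
import Mathlib
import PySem

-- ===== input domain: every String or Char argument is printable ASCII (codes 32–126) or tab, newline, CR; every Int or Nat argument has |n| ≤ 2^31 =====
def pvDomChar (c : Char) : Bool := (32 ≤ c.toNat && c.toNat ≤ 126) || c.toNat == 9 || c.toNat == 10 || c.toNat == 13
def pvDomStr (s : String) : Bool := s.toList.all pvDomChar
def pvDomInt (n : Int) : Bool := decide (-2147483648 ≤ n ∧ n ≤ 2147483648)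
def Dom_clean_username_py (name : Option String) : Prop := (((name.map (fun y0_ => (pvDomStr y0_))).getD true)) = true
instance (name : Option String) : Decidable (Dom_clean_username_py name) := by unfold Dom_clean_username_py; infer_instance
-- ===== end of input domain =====

-- B replaces A's per-char replacement + strip + "--"-collapse while-loop by a tokenize-then-join
-- over the maximal ASCII-alphanumeric runs (objective: simpler decomposition, same cost).

-- ===== PORT A =====
-- ch.isascii() is ord(ch) <= 127 (exact); ch.isalnum() is PySem.Chars.isalnum
def pvKeepA (c : Char) : Bool := decide (c.toNat ≤ 127) && PySem.Chars.isalnum c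

def pvMapA (c : Char) : Char := if pvKeepA c then PySem.Chars.lowerChar c else '-'

-- pvRep1 and the next three lemmas exist only to justify TERMINATION of the while-loop
-- port pvCollapseA (cited by its decreasing_by); they are proof devices, not the algorithm.
def pvRep1 : List Char → List Char
  | [] => []
  | [c] => [c]
  | c :: d :: t =>
    if c = '-' ∧ d = '-' then '-' :: pvRep1 t else c :: pvRep1 (d :: t)

lemma pvGo_eq (fuel : Nat) : ∀ (s acc : List Char), s.length ≤ fuel →
    PySem.Chars.replace.go ['-','-'] ['-'] fuel s acc = acc.reverse ++ pvRep1 s := by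
  induction fuel with
  | zero =>
    intro s acc h
    have : s = [] := List.eq_nil_of_length_eq_zero (Nat.le_zero.mp h)
    subst this; simp [PySem.Chars.replace.go, pvRep1]
  | succ n ih =>
    intro s acc h
    match s with
    | [] => simp [PySem.Chars.replace.go, pvRep1]
    | c :: t =>
      simp only [PySem.Chars.replace.go]
      by_cases hp : List.isPrefixOf ['-','-'] (c :: t) = true
      · obtain ⟨rfl, t2, rfl⟩ : c = '-' ∧ ∃ t2, t = '-' :: t2 := by
          cases t with
          | nil => simp [List.isPrefixOf] at hp
          | cons d t2 =>
            simp [List.isPrefixOf] at hp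
            exact ⟨hp.1.symm, t2, by rw [← hp.2]⟩
        simp only [hp, if_true]
        rw [show List.drop (['-','-'] : List Char).length ('-' :: '-' :: t2) = t2 from rfl,
            ih _ _ (by simp at h; omega)]
        simp [pvRep1]
      · simp only [hp]
        rw [if_neg (by simpa using hp), ih t (c :: acc) (by simp at h; omega)]
        cases t with
        | nil => simp [pvRep1]
        | cons d t2 =>
          have hne : ¬ (c = '-' ∧ d = '-') := by
            intro ⟨h1, h2⟩; subst h1; subst h2; simp [List.isPrefixOf] at hp
          simp [pvRep1, hne]

lemma pvRep1_length_le (s : List Char) : (pvRep1 s).length ≤ s.length := by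
  fun_induction pvRep1 s with
  | case1 => simp
  | case2 c => simp [pvRep1]
  | case3 c d t h ih => simp_all; omega
  | case4 c d t h ih => simp_all

lemma pvRep1_length_lt (s : List Char) (h : ['-','-'] <:+: s) :
    (pvRep1 s).length < s.length := by
  fun_induction pvRep1 s with
  | case1 => simp at h
  | case2 c => exact absurd (List.IsInfix.length_le h) (by simp)
  | case3 c d t hcd ih =>
    obtain ⟨rfl, rfl⟩ := hcd
    have := pvRep1_length_le t
    simp [pvRep1]; omega
  | case4 c d t hcd ih =>
    have h2 : ['-','-'] <:+: d :: t := by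
      rcases (List.infix_cons_iff).mp h with hpre | hinf
      · exfalso
        rcases hpre with ⟨u, hu⟩
        apply hcd
        cases u with
        | nil =>
          simp at hu
          exact ⟨hu.1.symm, hu.2.1.symm⟩
        | cons x u2 => injection hu with h1 h2; injection h2 with h3 h4; exact ⟨h1.symm, h3.symm⟩
      · exact hinf
    have := ih h2
    simp_all [pvRep1]

lemma pvReplace_eq (s : List Char) :
    PySem.Chars.replace s ['-','-'] ['-'] = pvRep1 s := by
  simp [PySem.Chars.replace, pvGo_eq s.length s [] le_rfl]

-- the loop `while "--" in cleaned: cleaned = cleaned.replace("--", "-")`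
def pvCollapseA (s : List Char) : List Char :=
  if h : PySem.Chars.isIn ['-','-'] s = true then
    pvCollapseA (PySem.Chars.replace s ['-','-'] ['-'])
  else s
termination_by s.length
decreasing_by
  rw [pvReplace_eq]
  exact pvRep1_length_lt s ((PySem.Chars.isIn_iff_infix _ _).mp h)

def clean_username_py (name : Option String) : Option String :=
  match name with
  | none => none
  | some s =>
    if s = "" then none
    else
      let cleaned0 := s.toList.map pvMapA
      let cleaned1 := PySem.Chars.stripChars cleaned0 ['-']
      let cleaned2 := pvCollapseA cleaned1
      if cleaned2.isEmpty || !(cleaned2.any pvKeepA) then none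
      else some (String.mk cleaned2)

-- ===== PORT B =====
-- the regex character class [A-Za-z0-9]
def pvReB (c : Char) : Bool :=
  (decide ('A' ≤ c) && decide (c ≤ 'Z')) || (decide ('a' ≤ c) && decide (c ≤ 'z'))
    || (decide ('0' ≤ c) && decide (c ≤ '9'))

-- re.findall(r"[A-Za-z0-9]+", s): the maximal runs of characters matching p
def pvRuns (p : Char → Bool) : List Char → List (List Char)
  | [] => []
  | c :: t =>
    if p c then (c :: t.takeWhile p) :: pvRuns p (t.dropWhile p)
    else pvRuns p t
termination_by l => l.length
decreasing_by
  · exact Nat.lt_succ_of_le (List.length_dropWhile_le p t)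
  · exact Nat.lt_succ_of_le le_rfl

def clean_username_py_alt (name : Option String) : Option String :=
  match name with
  | none => none
  | some s =>
    if s = "" then none
    else
      let parts := pvRuns pvReB s.toList
      if parts.isEmpty then none
      else some (String.mk (PySem.Chars.lower (PySem.Chars.join ['-'] parts)))

-- ===== PRECONDITION & SPEC =====
def Spec_clean_username_py (name : Option String) (out : Option String) : Prop := out = clean_username_py_alt name
instance (name : Option String) (out : Option String) : Decidable (Spec_clean_username_py name out) := by unfold Spec_clean_username_py; infer_instance

-- ===== CLAIM (what is proved, stated in full; the proofs are below) =====
def Claim_equal_clean_username_py : Prop := ∀ (name : Option String), Dom_clean_username_py name → Spec_clean_username_py name (clean_username_py name)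

-- ===== LEMMAS AND PROOFS =====
-- pvNH: the non-hyphen predicate (block structure of A's intermediate hyphenated string)
def pvNH (c : Char) : Bool := !(c == '-')

lemma pvCharLe (a c : Char) : (a ≤ c) ↔ a.toNat ≤ c.toNat := by
  rw [Char.le_def, UInt32.le_iff_toNat_le]; rfl

lemma pvOfNat_toNat (n : Nat) (h : n < 55296) : (Char.ofNat n).toNat = n := by
  have hv : n.isValidChar := Or.inl h
  simp [Char.ofNat, hv, Char.toNat, Char.ofNatAux]

lemma pvKeep_eq_reB (c : Char) : pvKeepA c = pvReB c := by
  have e : ∀ a : Char, ∀ b : Char, decide (a ≤ b) = decide (a.toNat ≤ b.toNat) := by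
    intro a b; simp [pvCharLe]
  simp only [pvKeepA, pvReB, PySem.Chars.isalnum, PySem.Chars.isalpha, PySem.Chars.isdigit,
    PySem.Chars.isupper, PySem.Chars.islower, e]
  rw [Bool.eq_iff_iff]
  simp only [Bool.and_eq_true, Bool.or_eq_true, decide_eq_true_eq]
  have hA : ('A').toNat = 65 := by decide
  have hZ : ('Z').toNat = 90 := by decide
  have ha : ('a').toNat = 97 := by decide
  have hz : ('z').toNat = 122 := by decide
  have h0 : ('0').toNat = 48 := by decide
  have h9 : ('9').toNat = 57 := by decide
  rw [hA, hZ, ha, hz, h0, h9]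
  omega

lemma pvLowerChar_toNat (c : Char) (h : pvReB c = true) :
    (PySem.Chars.lowerChar c).toNat =
      if 65 ≤ c.toNat ∧ c.toNat ≤ 90 then c.toNat + 32 else c.toNat := by
  have e : ∀ a : Char, ∀ b : Char, decide (a ≤ b) = decide (a.toNat ≤ b.toNat) := by
    intro a b; simp [pvCharLe]
  simp only [PySem.Chars.lowerChar, PySem.Chars.isupper, e]
  have hA : ('A').toNat = 65 := by decide
  have hZ : ('Z').toNat = 90 := by decide
  rw [hA, hZ]
  by_cases hu : 65 ≤ c.toNat ∧ c.toNat ≤ 90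
  · have hv : (c.toNat + 32) < 55296 := by omega
    simp only [hu, and_self, if_true, decide_eq_true_eq, Bool.and_eq_true]
    exact pvOfNat_toNat _ hv
  · simp only [hu, if_false]
    rcases Decidable.not_and_iff_not_or_not.mp hu with h1 | h1 <;>
      simp [h1, Bool.and_eq_true, decide_eq_true_eq]

lemma pvReB_lower (c : Char) (h : pvReB c = true) :
    pvReB (PySem.Chars.lowerChar c) = true := by
  have e : ∀ a : Char, ∀ b : Char, decide (a ≤ b) = decide (a.toNat ≤ b.toNat) := by
    intro a b; simp [pvCharLe]
  have hl := pvLowerChar_toNat c h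
  simp only [pvReB, e, Bool.or_eq_true, Bool.and_eq_true, decide_eq_true_eq] at h ⊢
  have hA : ('A').toNat = 65 := by decide
  have hZ : ('Z').toNat = 90 := by decide
  have ha : ('a').toNat = 97 := by decide
  have hz : ('z').toNat = 122 := by decide
  have h0 : ('0').toNat = 48 := by decide
  have h9 : ('9').toNat = 57 := by decide
  rw [hA, hZ, ha, hz, h0, h9] at h ⊢
  by_cases hu : 65 ≤ c.toNat ∧ c.toNat ≤ 90 <;> simp [hu] at hl <;> omega

lemma pvLower_ne_hy (c : Char) (h : pvReB c = true) :
    pvNH (PySem.Chars.lowerChar c) = true := by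
  have h2 := pvReB_lower c h
  simp only [pvNH, Bool.not_eq_eq_eq_not, Bool.not_true, beq_eq_false_iff_ne, ne_eq]
  intro hb
  rw [hb] at h2
  revert h2; decide

lemma pvNH_mapA (c : Char) : pvNH (pvMapA c) = pvReB c := by
  rw [pvMapA, pvKeep_eq_reB]
  by_cases h : pvReB c = true
  · simp [h, pvLower_ne_hy c h]
  · simp only [Bool.not_eq_true] at h; simp [h, pvNH]

lemma pvRuns_map (cs : List Char) :
    pvRuns pvNH (cs.map pvMapA) = (pvRuns pvReB cs).map (List.map PySem.Chars.lowerChar) := by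
  fun_induction pvRuns pvReB cs with
  | case1 => simp [pvRuns]
  | case2 c t hc ih =>
    have hfun : (pvNH ∘ pvMapA) = pvReB := funext fun d => pvNH_mapA d
    rw [List.map_cons, pvRuns, if_pos (by rw [pvNH_mapA]; exact hc)]
    rw [List.takeWhile_map, List.dropWhile_map, hfun, ih]
    simp only [List.map_cons, List.cons.injEq, List.map_map]
    simp only [pvMapA, pvKeep_eq_reB, hc, if_true, List.cons.injEq, true_and]
    refine ⟨List.map_congr_left ?_, trivial⟩
    intro a ha
    have ha2 := List.mem_takeWhile_imp ha
    simp [pvMapA, pvKeep_eq_reB, ha2]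
  | case3 c t hc ih =>
    rw [List.map_cons, pvRuns, if_neg (by rw [pvNH_mapA]; exact hc), ih]

lemma pvRuns_cons_hy (t : List Char) : pvRuns pvNH ('-' :: t) = pvRuns pvNH t := by
  rw [pvRuns]; simp [pvNH]

lemma pvRuns_append_hy_aux (n : Nat) : ∀ u : List Char, u.length ≤ n →
    pvRuns pvNH (u ++ ['-']) = pvRuns pvNH u := by
  induction n with
  | zero =>
    intro u h
    have : u = [] := List.eq_nil_of_length_eq_zero (Nat.le_zero.mp h)
    subst this
    rw [List.nil_append, pvRuns]
    simp [pvNH, pvRuns]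
  | succ n ih =>
    intro u h
    match u with
    | [] =>
      rw [List.nil_append, pvRuns]
      simp [pvNH, pvRuns]
    | c :: t =>
      by_cases hc : pvNH c = true
      · rw [List.cons_append, pvRuns, if_pos hc, pvRuns, if_pos hc]
        by_cases hall : ∀ a ∈ t, pvNH a = true
        · have ht : t.takeWhile pvNH = t := List.takeWhile_eq_self_iff.mpr hall
          have hd : t.dropWhile pvNH = [] := List.dropWhile_eq_nil_iff.mpr hall
          rw [List.takeWhile_append, ht, if_pos rfl, List.dropWhile_append, hd]
          simp [pvNH, hd, pvRuns]
        · have hne : t.takeWhile pvNH ≠ t := fun he => hall (List.takeWhile_eq_self_iff.mp he)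
          have hlen : (t.takeWhile pvNH).length ≠ t.length := fun he =>
            hne ((List.takeWhile_prefix pvNH).eq_of_length he)
          have hdne : t.dropWhile pvNH ≠ [] := by
            intro he
            exact hall fun a ha => List.dropWhile_eq_nil_iff.mp he a ha
          rw [List.takeWhile_append, if_neg hlen, List.dropWhile_append,
              if_neg (by simpa using hdne)]
          have : (t.dropWhile pvNH).length ≤ n := by
            have h1 := List.length_dropWhile_le pvNH t
            simp at h
            omega
          rw [ih _ this]
      · rw [List.cons_append, pvRuns, if_neg (by simpa using hc), pvRuns,
            if_neg (by simpa using hc)]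
        exact ih t (by simp at h; omega)

lemma pvRuns_append_hy (u : List Char) : pvRuns pvNH (u ++ ['-']) = pvRuns pvNH u :=
  pvRuns_append_hy_aux u.length u le_rfl

lemma pvStrip_cons_hy (t : List Char) :
    PySem.Chars.stripChars ('-' :: t) ['-'] = PySem.Chars.stripChars t ['-'] := by
  simp [PySem.Chars.stripChars, List.dropWhile_cons]

lemma pvStrip_append_hy (u : List Char) :
    PySem.Chars.stripChars (u ++ ['-']) ['-'] = PySem.Chars.stripChars u ['-'] := by
  simp only [PySem.Chars.stripChars]
  by_cases hall : (List.dropWhile (fun c => List.contains ['-'] c) u).isEmpty = true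
  · rw [List.dropWhile_append, if_pos hall]
    rw [List.isEmpty_iff] at hall
    rw [hall]
    simp [List.dropWhile_cons]
  · rw [List.dropWhile_append, if_neg hall]
    rw [List.reverse_append]
    simp only [List.reverse_cons, List.reverse_nil, List.nil_append, List.singleton_append,
      List.dropWhile_cons]
    rw [if_pos (by simp)]

lemma pvStrip_id (ds : List Char) (h1 : ds.head? ≠ some '-') (h2 : ds.getLast? ≠ some '-') :
    PySem.Chars.stripChars ds ['-'] = ds := by
  have hdw : ∀ (l : List Char), l.head? ≠ some '-' →
      List.dropWhile (fun c => List.contains ['-'] c) l = l := by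
    intro l hl
    rw [List.dropWhile_eq_self_iff]
    intro hlen hp
    apply hl
    rw [List.head?_eq_getElem?, List.getElem?_eq_getElem hlen]
    simp at hp
    rw [hp]
  simp only [PySem.Chars.stripChars]
  rw [hdw ds h1, hdw ds.reverse (by rw [List.head?_reverse]; exact h2), List.reverse_reverse]

lemma pvGetLast?_cons (c : Char) (l : List Char) (h : l ≠ []) :
    (c :: l).getLast? = l.getLast? := by
  cases l with
  | nil => exact absurd rfl h
  | cons d t => simp [List.getLast?_cons_cons]

lemma pvRep1_ne_nil (s : List Char) (h : s ≠ []) : pvRep1 s ≠ [] := by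
  fun_induction pvRep1 s with
  | case1 => exact absurd rfl h
  | case2 c => simp
  | case3 c d t hcd ih => simp
  | case4 c d t hcd ih => simp

lemma pvRep1_head? (s : List Char) : (pvRep1 s).head? = s.head? := by
  fun_induction pvRep1 s with
  | case1 => rfl
  | case2 c => rfl
  | case3 c d t hcd ih => simp [hcd.1]
  | case4 c d t hcd ih => simp

lemma pvRep1_getLast? (s : List Char) : (pvRep1 s).getLast? = s.getLast? := by
  fun_induction pvRep1 s with
  | case1 => rfl
  | case2 c => rfl
  | case3 c d t hcd ih =>
    obtain ⟨rfl, rfl⟩ := hcd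
    match t with
    | [] => simp [pvRep1]
    | e :: t2 =>
      have hne := pvRep1_ne_nil (e :: t2) (by simp)
      rw [pvGetLast?_cons _ _ hne, ih]
      rw [pvGetLast?_cons ('-') ('-'::e::t2) (by simp),
          pvGetLast?_cons ('-') (e::t2) (by simp)]
  | case4 c d t hcd ih =>
    have hne := pvRep1_ne_nil (d :: t) (by simp)
    rw [pvGetLast?_cons _ _ hne, ih, pvGetLast?_cons c (d::t) (by simp)]

lemma pvRep1_append_run (r rest : List Char) (hr : ∀ a ∈ r, pvNH a = true) :
    pvRep1 (r ++ rest) = r ++ pvRep1 rest := by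
  induction r with
  | nil => simp
  | cons c r2 ih =>
    have hc : c ≠ '-' := by
      have := hr c (by simp)
      simp [pvNH] at this
      exact this
    rw [List.cons_append]
    have step : pvRep1 (c :: (r2 ++ rest)) = c :: pvRep1 (r2 ++ rest) := by
      match h2 : r2 ++ rest with
      | [] => simp [pvRep1]
      | d :: t => rw [pvRep1]; simp [hc]
    rw [step, ih (fun a ha => hr a (by simp [ha])), List.cons_append]

lemma pvDropWhile_head_false (p : Char → Bool) (l : List Char) (x : Char) (t : List Char)
    (h : l.dropWhile p = x :: t) : p x = false := by
  induction l with
  | nil => simp at h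
  | cons c l2 ih =>
    rw [List.dropWhile_cons] at h
    by_cases hc : p c = true
    · rw [if_pos hc] at h; exact ih h
    · rw [if_neg hc] at h
      injection h with h1 h2
      subst h1; simpa using hc

lemma pvRuns_block_append (c : Char) (r2 X : List Char)
    (hr : ∀ a ∈ c :: r2, pvNH a = true) (hX : X = [] ∨ X.head? = some '-') :
    pvRuns pvNH ((c :: r2) ++ X) = (c :: r2) :: pvRuns pvNH X := by
  have hr2 : ∀ a ∈ r2, pvNH a = true := fun a ha => hr a (by simp [ha])
  have htw : (r2 ++ X).takeWhile pvNH = r2 := by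
    rw [List.takeWhile_append, List.takeWhile_eq_self_iff.mpr hr2, if_pos rfl]
    rcases hX with rfl | hh
    · simp
    · match X with
      | x :: X2 =>
        simp at hh
        subst hh
        simp [List.takeWhile_cons, pvNH]
  have hdw : (r2 ++ X).dropWhile pvNH = X := by
    rw [List.dropWhile_append, if_pos (by simp [List.dropWhile_eq_nil_iff.mpr hr2])]
    rcases hX with rfl | hh
    · simp
    · match X with
      | x :: X2 =>
        simp at hh
        subst hh
        simp [List.dropWhile_cons, pvNH]
  rw [List.cons_append, pvRuns, if_pos (hr c (by simp)), htw, hdw]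

lemma pvRep1_runs_aux (n : Nat) : ∀ s : List Char, s.length ≤ n →
    pvRuns pvNH (pvRep1 s) = pvRuns pvNH s := by
  induction n with
  | zero =>
    intro s h
    have : s = [] := List.eq_nil_of_length_eq_zero (Nat.le_zero.mp h)
    subst this; rfl
  | succ n ih =>
    intro s h
    match s with
    | [] => rfl
    | c :: t =>
      by_cases hcc : c = '-'
      · subst hcc
        match t with
        | [] => rfl
        | d :: t2 =>
          by_cases hd : d = '-'
          · subst hd
            have hstep : pvRep1 ('-' :: '-' :: t2) = '-' :: pvRep1 t2 := by
              rw [pvRep1, if_pos ⟨rfl, rfl⟩]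
            rw [hstep, pvRuns_cons_hy, pvRuns_cons_hy, pvRuns_cons_hy,
                ih t2 (by simp at h; omega)]
          · have hstep : pvRep1 ('-' :: d :: t2) = '-' :: pvRep1 (d :: t2) := by
              rw [pvRep1, if_neg (by simp [hd])]
            rw [hstep, pvRuns_cons_hy, pvRuns_cons_hy, ih (d :: t2) (by simp at h ⊢; omega)]
      · have hc : pvNH c = true := by simp [pvNH, hcc]
        have hsplit : t = t.takeWhile pvNH ++ t.dropWhile pvNH :=
          (List.takeWhile_append_dropWhile).symm
        have hr2 : ∀ a ∈ t.takeWhile pvNH, pvNH a = true := fun a ha =>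
          List.mem_takeWhile_imp ha
        have hrest : t.dropWhile pvNH = [] ∨ (t.dropWhile pvNH).head? = some '-' := by
          match hx : t.dropWhile pvNH with
          | [] => exact Or.inl rfl
          | x :: X2 =>
            have := pvDropWhile_head_false pvNH t x X2 hx
            simp [pvNH] at this
            subst this
            exact Or.inr rfl
        have hall : ∀ a ∈ c :: t.takeWhile pvNH, pvNH a = true := by
          intro a ha
          rcases List.mem_cons.mp ha with rfl | ha2
          · exact hc
          · exact hr2 a ha2
        have hrep : pvRep1 (c :: t) =
            (c :: t.takeWhile pvNH) ++ pvRep1 (t.dropWhile pvNH) := by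
          conv_lhs => rw [show c :: t = (c :: t.takeWhile pvNH) ++ t.dropWhile pvNH by
            rw [List.cons_append, ← hsplit]]
          exact pvRep1_append_run _ _ hall
        have hrest2 : pvRep1 (t.dropWhile pvNH) = [] ∨
            (pvRep1 (t.dropWhile pvNH)).head? = some '-' := by
          rcases hrest with he | hh
          · exact Or.inl (by rw [he]; rfl)
          · exact Or.inr (by rw [pvRep1_head?]; exact hh)
        rw [hrep, pvRuns_block_append c _ _ hall hrest2,
            ih (t.dropWhile pvNH) (by
              have := List.length_dropWhile_le pvNH t
              simp at h; omega)]
        conv_rhs => rw [show c :: t = (c :: t.takeWhile pvNH) ++ t.dropWhile pvNH by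
          rw [List.cons_append, ← hsplit]]
        rw [pvRuns_block_append c _ _ hall hrest]

lemma pvRep1_runs (s : List Char) : pvRuns pvNH (pvRep1 s) = pvRuns pvNH s :=
  pvRep1_runs_aux s.length s le_rfl

lemma pvJoin_cons (sep a : List Char) (L : List (List Char)) (hL : L ≠ []) :
    sep.intercalate (a :: L) = a ++ sep ++ sep.intercalate L := by
  match L with
  | b :: L2 =>
    rw [List.intercalate, List.intersperse_cons₂, List.flatten_cons, List.flatten_cons,
        List.intercalate, List.append_assoc]

lemma pvJoin_runs_aux (n : Nat) : ∀ ds : List Char, ds.length ≤ n →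
    ds.head? ≠ some '-' → ds.getLast? ≠ some '-' → ¬ ['-','-'] <:+: ds →
    PySem.Chars.join ['-'] (pvRuns pvNH ds) = ds := by
  induction n with
  | zero =>
    intro ds h _ _ _
    have : ds = [] := List.eq_nil_of_length_eq_zero (Nat.le_zero.mp h)
    subst this
    simp [PySem.Chars.join, pvRuns, List.intercalate]
  | succ n ih =>
    intro ds h h1 h2 h3
    match ds with
    | [] => simp [PySem.Chars.join, pvRuns, List.intercalate]
    | c :: t =>
      have hc : c ≠ '-' := fun he => h1 (by rw [he]; rfl)
      have hcNH : pvNH c = true := by simp [pvNH, hc]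
      rw [pvRuns, if_pos hcNH]
      match hdw : t.dropWhile pvNH with
      | [] =>
        have htw : t.takeWhile pvNH = t := by
          have := List.takeWhile_append_dropWhile (p := pvNH) (l := t)
          rw [hdw, List.append_nil] at this
          exact this
        rw [htw]
        simp [pvRuns, PySem.Chars.join, List.intercalate]
      | x :: t2 =>
        have hx : x = '-' := by
          have := pvDropWhile_head_false pvNH t x t2 hdw
          simp [pvNH] at this
          exact this
        subst hx
        have hsplit : t = t.takeWhile pvNH ++ '-' :: t2 := by
          conv_lhs => rw [← List.takeWhile_append_dropWhile (p := pvNH) (l := t)]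
          rw [hdw]
        have hds2 : c :: t = (c :: List.takeWhile pvNH t ++ ['-']) ++ t2 := by
          rw [List.append_assoc, List.singleton_append, List.cons_append, ← hsplit]
        have ht2ne : t2 ≠ [] := by
          rintro rfl
          apply h2
          rw [show c :: t = (c :: t.takeWhile pvNH) ++ ['-'] by
            rw [List.cons_append, ← hsplit]]
          rw [List.getLast?_append]
          rfl
        have ht2h : t2.head? ≠ some '-' := by
          intro hh
          apply h3
          obtain ⟨t3, rfl⟩ : ∃ t3, t2 = '-' :: t3 := by
            match t2, hh with
            | e :: t3, hh =>
              simp at hh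
              exact ⟨t3, by rw [hh]⟩
          refine ⟨c :: t.takeWhile pvNH, t3, ?_⟩
          conv_rhs => rw [hsplit]
          simp
        have ht2last : t2.getLast? ≠ some '-' := by
          intro hh
          apply h2
          rw [hds2, List.getLast?_append_of_ne_nil _ ht2ne]
          exact hh
        have ht2inf : ¬ ['-','-'] <:+: t2 := by
          intro hinf
          apply h3
          refine hinf.trans (List.IsSuffix.isInfix ⟨c :: List.takeWhile pvNH t ++ ['-'], hds2.symm⟩)
        have ht2len : t2.length ≤ n := by
          have : t.length = (t.takeWhile pvNH).length + (t2.length + 1) := by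
            conv_lhs => rw [hsplit]
            simp
          simp at h
          omega
        have hrec := ih t2 ht2len ht2h ht2last ht2inf
        rw [pvRuns_cons_hy]
        have ht2runs : ∃ b L, pvRuns pvNH t2 = b :: L := by
          match t2, ht2h with
          | e :: t3, hh =>
            have he : pvNH e = true := by
              simp [pvNH]
              intro hee
              exact hh (by rw [hee]; rfl)
            rw [pvRuns, if_pos he]
            exact ⟨_, _, rfl⟩
        obtain ⟨b, L, hbL⟩ := ht2runs
        rw [PySem.Chars.join] at *
        rw [hbL, pvJoin_cons _ _ _ (by simp), ← hbL, hrec]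
        rw [show c :: t = c :: t.takeWhile pvNH ++ '-' :: t2 by rw [List.cons_append, ← hsplit]]
        simp

lemma pvJoin_runs (ds : List Char) (h1 : ds.head? ≠ some '-') (h2 : ds.getLast? ≠ some '-')
    (h3 : ¬ ['-','-'] <:+: ds) :
    PySem.Chars.join ['-'] (pvRuns pvNH ds) = ds :=
  pvJoin_runs_aux ds.length ds le_rfl h1 h2 h3

lemma pvMaster_aux (n : Nat) : ∀ ds : List Char, ds.length ≤ n →
    pvCollapseA (PySem.Chars.stripChars ds ['-']) =
      PySem.Chars.join ['-'] (pvRuns pvNH ds) := by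
  induction n with
  | zero =>
    intro ds h
    have : ds = [] := List.eq_nil_of_length_eq_zero (Nat.le_zero.mp h)
    subst this
    rw [show PySem.Chars.stripChars [] ['-'] = [] from rfl, pvCollapseA]
    simp [PySem.Chars.isIn_iff_infix, PySem.Chars.join, pvRuns, List.intercalate]
  | succ n ih =>
    intro ds h
    by_cases h1 : ds.head? = some '-'
    · obtain ⟨t, rfl⟩ : ∃ t, ds = '-' :: t := by
        match ds, h1 with
        | c :: t, h1 => exact ⟨t, by simp at h1; rw [h1]⟩
      rw [pvStrip_cons_hy, pvRuns_cons_hy]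
      exact ih t (by simp at h; omega)
    · by_cases h2 : ds.getLast? = some '-'
      · have hne : ds ≠ [] := by rintro rfl; simp at h2
        obtain ⟨u, rfl⟩ : ∃ u, ds = u ++ ['-'] := by
          refine ⟨ds.dropLast, ?_⟩
          have hg : ds.getLast hne = '-' := by
            rw [List.getLast?_eq_getLast hne] at h2
            exact Option.some.inj h2
          conv_lhs => rw [← List.dropLast_append_getLast hne, hg]
        rw [pvStrip_append_hy, pvRuns_append_hy]
        exact ih u (by simp at h; omega)
      · rw [pvStrip_id ds h1 h2, pvCollapseA]
        by_cases hin : PySem.Chars.isIn ['-','-'] ds = true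
        · rw [dif_pos hin, pvReplace_eq]
          have hlt := pvRep1_length_lt ds ((PySem.Chars.isIn_iff_infix _ _).mp hin)
          have hih := ih (pvRep1 ds) (by omega)
          rw [pvStrip_id (pvRep1 ds) (by rw [pvRep1_head?]; exact h1)
                (by rw [pvRep1_getLast?]; exact h2)] at hih
          rw [hih, pvRep1_runs]
        · rw [dif_neg hin]
          exact (pvJoin_runs ds h1 h2
            ((PySem.Chars.isIn_eq_false_iff _ _).mp (by simpa using hin))).symm

lemma pvMaster (ds : List Char) :
    pvCollapseA (PySem.Chars.stripChars ds ['-']) =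
      PySem.Chars.join ['-'] (pvRuns pvNH ds) :=
  pvMaster_aux ds.length ds le_rfl

lemma pvRuns_first (p : Char → Bool) (cs : List Char) : ∀ (part : List Char)
    (rest : List (List Char)), pvRuns p cs = part :: rest →
    ∃ c t, part = c :: t ∧ p c = true := by
  fun_induction pvRuns p cs with
  | case1 => intro part rest h; simp at h
  | case2 c t hc ih =>
    intro part rest h
    injection h with h1 h2
    exact ⟨c, t.takeWhile p, h1.symm, hc⟩
  | case3 c t hc ih => exact ih

lemma pvMap_intercalate (f : Char → Char) (sep : List Char) (L : List (List Char)) :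
    (sep.intercalate L).map f = (sep.map f).intercalate (L.map (List.map f)) := by
  induction L with
  | nil => simp [List.intercalate]
  | cons a L2 ih =>
    match L2 with
    | [] => simp [List.intercalate]
    | b :: L3 =>
      rw [pvJoin_cons sep a (b :: L3) (by simp)]
      simp only [List.map_cons]
      rw [pvJoin_cons (sep.map f) (a.map f) (List.map f b :: List.map (List.map f) L3)
            (by simp)]
      simp only [List.map_append, List.map_cons] at ih ⊢
      rw [ih]

lemma pvEqual (name : Option String) : clean_username_py name = clean_username_py_alt name := by
  match name with
  | none => rfl
  | some s =>
    rw [clean_username_py, clean_username_py_alt]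
    by_cases hs : s = ""
    · simp [hs]
    · simp only [hs, if_false]
      have hchain : pvCollapseA (PySem.Chars.stripChars (s.toList.map pvMapA) ['-']) =
          PySem.Chars.join ['-'] ((pvRuns pvReB s.toList).map (List.map PySem.Chars.lowerChar)) := by
        rw [pvMaster, pvRuns_map]
      match hp : pvRuns pvReB s.toList with
      | [] =>
        rw [hp] at hchain
        simp only [hchain]
        simp [PySem.Chars.join, List.intercalate]
      | p0 :: rest =>
        obtain ⟨c0, t0, rfl, hc0⟩ := pvRuns_first pvReB s.toList p0 rest hp
        rw [hp] at hchain
        have hexp : ∃ suf, PySem.Chars.join ['-']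
            (((c0 :: t0) :: rest).map (List.map PySem.Chars.lowerChar)) =
            PySem.Chars.lowerChar c0 :: suf := by
          match rest with
          | [] =>
            refine ⟨List.map PySem.Chars.lowerChar t0, ?_⟩
            simp [PySem.Chars.join, List.intercalate]
          | r1 :: rest2 =>
            refine ⟨(List.map PySem.Chars.lowerChar t0 ++ ['-']) ++
              ['-'].intercalate (List.map PySem.Chars.lowerChar r1 ::
                List.map (List.map PySem.Chars.lowerChar) rest2), ?_⟩
            rw [PySem.Chars.join, List.map_cons, List.map_cons, List.map_cons,
                pvJoin_cons _ _ _ (by simp), List.cons_append, List.cons_append]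
        obtain ⟨suf, hsuf⟩ := hexp
        rw [hchain, hsuf]
        have hkeep : pvKeepA (PySem.Chars.lowerChar c0) = true := by
          rw [pvKeep_eq_reB]
          exact pvReB_lower c0 hc0
        simp only [List.isEmpty_cons, List.any_cons, hkeep, Bool.true_or, Bool.not_true,
          Bool.or_false, if_false, Bool.false_or]
        rw [← hsuf]
        congr 1
        rw [PySem.Chars.lower, PySem.Chars.join, PySem.Chars.join, pvMap_intercalate]
        rfl

-- ===== VERDICT (by name: the statement is the Claim_ definition above) =====
theorem clean_username_py_spec : Claim_equal_clean_username_py := by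
  intro name _
  unfold Spec_clean_username_py
  exact pvEqual name
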